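-- pv_equiv track=rewrite | github.com/flpflJ/SCryptoTelegram_bot | utils/my_utils.py | split_bigrams
-- ===== SOURCE A (Python) =====
-- def split_bigrams(text):
--     mas = []
--     strk = ""
--     for ind, k in enumerate(text):
--         if len(strk) == 0:
--             strk += k
--         else:
--             if strk[0] == k and k == '~':
--                 strk += '#'
--                 mas.append(strk)
--                 strk = k
--             elif strk[0] == k:
--                 strk += '~'
--                 mas.append(strk)
--                 strk = k
--             else:
--                 strk+= k
--                 mas.append(strk)
--                 strk = ""
--     if strk and strk != '~':
--         mas.append(strk + '~')
--     elif strk and strk == '~':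
--         mas.append(strk + '#')
--     return mas
-- ===== SOURCE B (Python) =====
-- def split_bigrams(text):
--     res = []
--     i, n = 0, len(text)
--     while i < n - 1:
--         a, b = text[i], text[i + 1]
--         if a == b:
--             res.append(a + ('#' if a == '~' else '~'))
--             i += 1
--         else:
--             res.append(a + b)
--             i += 2
--     if i < n:
--         c = text[i]
--         res.append(c + ('#' if c == '~' else '~'))
--     return res
-- ===== Notes on version B (the rewrite author's own statement) =====
-- stated objective: alternative
-- what changed: Replaced A's fold carrying a pending string buffer with a two-pointer index scan that decides each pair by lookahead (stride 1 on equal chars, 2 otherwise) and pads a trailing char after the loop.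
import Mathlib
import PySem

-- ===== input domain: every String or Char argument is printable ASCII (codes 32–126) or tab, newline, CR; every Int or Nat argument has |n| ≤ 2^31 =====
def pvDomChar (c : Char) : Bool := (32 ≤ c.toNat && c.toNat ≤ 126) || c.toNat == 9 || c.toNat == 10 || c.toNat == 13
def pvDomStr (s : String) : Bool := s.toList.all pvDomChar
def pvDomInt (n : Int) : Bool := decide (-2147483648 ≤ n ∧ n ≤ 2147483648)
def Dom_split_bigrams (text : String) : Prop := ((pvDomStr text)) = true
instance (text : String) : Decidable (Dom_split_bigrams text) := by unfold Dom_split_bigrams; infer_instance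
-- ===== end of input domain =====

-- B replaces A's pending-buffer fold by a two-pointer lookahead scan; same O(n) cost, different decomposition.

-- ===== PORT A =====
-- A's loop body: state is (mas, strk); strk is the pending buffer string (kept as List Char).
def pvStepA (st : List String × List Char) (k : Char) : List String × List Char :=
  let (mas, strk) := st
  if strk.length == 0 then (mas, strk ++ [k])
  else if strk.headD ' ' == k && k == '~' then (mas ++ [String.ofList (strk ++ ['#'])], [k])
  else if strk.headD ' ' == k then (mas ++ [String.ofList (strk ++ ['~'])], [k])
  else (mas ++ [String.ofList (strk ++ [k])], [])

-- A's trailing `if strk and strk != '~' … elif …` block.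
def pvFinishA (st : List String × List Char) : List String :=
  let (mas, strk) := st
  if !strk.isEmpty && strk != ['~'] then mas ++ [String.ofList (strk ++ ['~'])]
  else if !strk.isEmpty && strk == ['~'] then mas ++ [String.ofList (strk ++ ['#'])]
  else mas

def split_bigrams (text : String) : List String :=
  pvFinishA (text.toList.foldl pvStepA ([], []))

-- ===== PORT B =====
-- B's while loop as structural recursion over the remaining characters (i advances 1 or 2).
def pvPad (c : Char) : Char := if c == '~' then '#' else '~'

def pvGoB : List Char → List String
  | [] => []
  | [c] => [String.ofList [c, pvPad c]]
  | a :: b :: rest =>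
      if a == b then String.ofList [a, pvPad a] :: pvGoB (b :: rest)
      else String.ofList [a, b] :: pvGoB rest

def split_bigrams_alt (text : String) : List String := pvGoB text.toList

-- ===== PRECONDITION & SPEC =====
def Spec_split_bigrams (text : String) (out : List String) : Prop := out = split_bigrams_alt text
instance (text : String) (out : List String) : Decidable (Spec_split_bigrams text out) := by unfold Spec_split_bigrams; infer_instance

-- ===== CLAIM (what is proved, stated in full; the proofs are below) =====
def Claim_equal_split_bigrams : Prop := ∀ (text : String), Dom_split_bigrams text → Spec_split_bigrams text (split_bigrams text)

-- ===== LEMMAS AND PROOFS =====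
-- Joint loop invariant: finishing A's fold from an empty / one-char buffer produces B's scan output.
theorem pvMain (l : List Char) :
    (∀ mas, pvFinishA (l.foldl pvStepA (mas, [])) = mas ++ pvGoB l) ∧
    (∀ mas c, pvFinishA (l.foldl pvStepA (mas, [c])) = mas ++ pvGoB (c :: l)) := by
  induction l with
  | nil =>
      refine ⟨fun mas => by simp [pvFinishA, pvGoB], fun mas c => ?_⟩
      by_cases h : c = '~' <;> simp [pvFinishA, pvGoB, pvPad, h]
  | cons k rest ih =>
      refine ⟨fun mas => ?_, fun mas c => ?_⟩
      · simp only [List.foldl_cons, pvStepA]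
        simpa using ih.2 mas k
      · by_cases hck : c = k
        · subst hck
          by_cases ht : c = '~'
          · subst ht
            simp only [List.foldl_cons, pvStepA]
            simpa [pvGoB, pvPad, List.append_assoc] using (ih.2 (mas ++ [String.ofList ['~', '#']]) '~')
          · simp only [List.foldl_cons, pvStepA]
            simp [ht]
            simpa [pvGoB, pvPad, ht, List.append_assoc] using (ih.2 (mas ++ [String.ofList [c, '~']]) c)
        · simp only [List.foldl_cons, pvStepA]
          simp [hck, Ne.symm]
          have hbk : (c == k) = false := by simp [hck]
          simpa [pvGoB, pvPad, hbk, hck, List.append_assoc] using (ih.1 (mas ++ [String.ofList [c, k]]))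

-- ===== VERDICT (by name: the statement is the Claim_ definition above) =====
theorem split_bigrams_spec : Claim_equal_split_bigrams := by
  intro text _
  unfold Spec_split_bigrams split_bigrams split_bigrams_alt
  simpa using (pvMain text.toList).1 []
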